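-- pv_equiv track=rewrite | github.com/ritikasinghal24/CYBER-ASSIGNMENT | ASSIGNMENT3/q8.py | func
-- ===== SOURCE A (Python) =====
-- def func(lis,n):
--     list=[0,0,7]
--     k=0
--     for i in list:
--         for j in range(0+k,n):
--             if(i==lis[j]):
--                 k=j+1
--                 break
--         else:
--             return "false"
--     return "true"
-- ===== SOURCE B (Python) =====
-- def func(lis, n):
--     pattern = [0, 0, 7]
--     k = 0
--     for j in range(n):
--         if lis[j] == pattern[k]:
--             k += 1
--             if k == len(pattern):
--                 return "true"
--     return "false"
-- ===== Notes on version B (the rewrite author's own statement) =====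
-- stated objective: simpler
-- what changed: Flattened A's nested for/else loops (one inner scan per pattern element, restarted via k) into a single pass over the list with a pattern pointer.
import Mathlib
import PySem

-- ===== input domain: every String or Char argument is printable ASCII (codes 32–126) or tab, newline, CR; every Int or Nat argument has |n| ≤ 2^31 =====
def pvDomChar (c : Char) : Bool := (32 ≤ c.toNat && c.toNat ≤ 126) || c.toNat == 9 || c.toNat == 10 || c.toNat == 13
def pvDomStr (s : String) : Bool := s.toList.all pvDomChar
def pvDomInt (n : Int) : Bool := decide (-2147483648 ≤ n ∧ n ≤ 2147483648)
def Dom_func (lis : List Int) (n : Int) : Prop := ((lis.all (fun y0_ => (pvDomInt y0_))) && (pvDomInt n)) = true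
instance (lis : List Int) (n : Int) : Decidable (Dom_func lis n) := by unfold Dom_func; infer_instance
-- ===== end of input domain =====

-- B flattens A's nested for/else pattern-search loops into a single pass with a pattern pointer (objective: simpler).
-- Pre_func excludes exactly the inputs where the Python raises IndexError (n exceeds the list length and [0,0,7] is not a subsequence); both A and B raise there.


-- ===== PORT A =====
-- inner 'for j in range(k, n): if i == lis[j]: …' with the for/else; returns the j of the first match,
-- none if the range is exhausted (the 'else' branch).  An out-of-range lis[j] is an IndexError in
-- Python (excluded by Pre_func); the port returns none there.
def funcInner (lis : List Int) (i : Int) (js : List Int) : Option Int :=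
  match js with
  | [] => none
  | j :: rest =>
    match PySem.List.pyGet? lis j with
    | none => none
    | some v => if i == v then some j else funcInner lis i rest

-- outer 'for i in list:' carrying k; on a match at j, k becomes j+1
def funcOuter (lis : List Int) (n : Int) (pat : List Int) (k : Int) : String :=
  match pat with
  | [] => "true"
  | i :: rest =>
    match funcInner lis i (PySem.List.pyRange k n 1) with
    | none => "false"
    | some j => funcOuter lis n rest (j + 1)

def func (lis : List Int) (n : Int) : String := funcOuter lis n [0, 0, 7] 0

-- ===== PORT B =====
-- single pass over range(n) with a pattern pointer k; out-of-range lis[j] is an IndexError in Python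
-- (excluded by Pre_func); the port returns "false" there.
def funcAltLoop (lis : List Int) (js : List Int) (k : Nat) : String :=
  match js with
  | [] => "false"
  | j :: rest =>
    match PySem.List.pyGet? lis j with
    | none => "false"
    | some v =>
      if v == ([0, 0, 7] : List Int).getD k 0 then
        if k + 1 == 3 then "true" else funcAltLoop lis rest (k + 1)
      else funcAltLoop lis rest k

def func_alt (lis : List Int) (n : Int) : String :=
  funcAltLoop lis (PySem.List.pyRange 0 n 1) 0

-- ===== PRECONDITION & SPEC =====
-- Pre_func excludes exactly the inputs where A raises IndexError: n larger than the list length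
-- while [0,0,7] is not a subsequence of lis (B raises at the same index there).
def Pre_func (lis : List Int) (n : Int) : Prop :=
  n ≤ (lis.length : Int) ∨ ([0, 0, 7] : List Int).Sublist lis
instance (lis : List Int) (n : Int) : Decidable (Pre_func lis n) := by unfold Pre_func; infer_instance
def pvWitness_func : List Int × Int := ([0, 0, 7], 3)

def Spec_func (lis : List Int) (n : Int) (out : String) : Prop := out = func_alt lis n
instance (lis : List Int) (n : Int) (out : String) : Decidable (Spec_func lis n out) := by unfold Spec_func; infer_instance

-- ===== CLAIM (what is proved, stated in full; the proofs are below) =====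
def Claim_equal_func : Prop := ∀ (lis : List Int) (n : Int), Dom_func lis n → Pre_func lis n → Spec_func lis n (func lis n)

-- ===== LEMMAS AND PROOFS =====

-- Main invariant: at scan position k with pattern suffix pat = [0,0,7].drop kp remaining,
-- A's outer loop and B's flat loop agree, provided indices stay in range (the invariant disjunction).
lemma func_key : ∀ (m : Nat) (k n : Int) (lis : List Int) (kp : Nat) (pat : List Int),
    (n - k).toNat = m → 0 ≤ k → kp < 3 → pat = ([0, 0, 7] : List Int).drop kp →
    (n ≤ (lis.length : Int) ∨ pat.Sublist (lis.drop k.toNat)) →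
    funcOuter lis n pat k = funcAltLoop lis (PySem.List.pyRange k n 1) kp := by
  intro m
  induction m with
  | zero =>
    intro k n lis kp pat hm hk hkp hpat hinv
    have hn : n ≤ k := by omega
    rw [PySem.List.pyRange_one_eq_nil hn]
    interval_cases kp <;> simp_all [funcOuter, funcInner, funcAltLoop]
  | succ m ih =>
    intro k n lis kp pat hm hk hkp hpat hinv
    have hkn : k < n := by omega
    rw [PySem.List.pyRange_one_cons hkn]
    -- the access lis[k] is in range
    have hklen : k.toNat < lis.length := by
      rcases hinv with h | h
      · omega
      · by_contra hge
        have : lis.drop k.toNat = [] := List.drop_eq_nil_of_le (by omega)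
        rw [this] at h
        have := List.sublist_nil.mp h
        interval_cases kp <;> simp_all
    have hget : PySem.List.pyGet? lis k = some lis[k.toNat] := by
      exact PySem.List.pyGet?_eq_some_getElem lis hk (by omega)
    have hdrop : lis.drop k.toNat = lis[k.toNat] :: lis.drop (k.toNat + 1) :=
      List.drop_eq_getElem_cons hklen
    have hk1 : (k + 1).toNat = k.toNat + 1 := by omega
    -- head of the pattern suffix
    obtain ⟨i, rest, hpr⟩ : ∃ i rest, pat = i :: rest ∧ i = ([0,0,7] : List Int).getD kp 0 ∧ rest = ([0,0,7] : List Int).drop (kp+1) := by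
      interval_cases kp
      · exact ⟨0, [0, 7], by simpa using hpat, by decide, by decide⟩
      · exact ⟨0, [7], by simpa using hpat, by decide, by decide⟩
      · exact ⟨7, [], by simpa using hpat, by decide, by decide⟩
    obtain ⟨hpat', hi, hrest⟩ := hpr
    subst hpat'
    by_cases hv : lis[k.toNat] = i
    · -- match at index k
      have hstepA : funcOuter lis n (i :: rest) k = funcOuter lis n rest (k + 1) := by
        rw [funcOuter, PySem.List.pyRange_one_cons hkn, funcInner, hget]
        simp [hv]
      have hstepB : funcAltLoop lis (k :: PySem.List.pyRange (k+1) n 1) kp =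
          if kp + 1 == 3 then "true" else funcAltLoop lis (PySem.List.pyRange (k+1) n 1) (kp+1) := by
        rw [funcAltLoop, hget]
        simp [hv, hi]
      rw [hstepA, hstepB]
      by_cases h3 : kp + 1 = 3
      · -- pattern complete: rest = []
        have hr : rest = [] := by
          have hkp2 : kp = 2 := by omega
          simp [hkp2] at hrest; exact hrest
        simp [hr, funcOuter, h3]
      · have hkp' : kp + 1 < 3 := by omega
        simp only [h3, beq_iff_eq]
        apply ih (k+1) n lis (kp+1) rest (by omega) (by omega) hkp' hrest
        rcases hinv with h | h
        · exact Or.inl h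
        · right
          rw [hk1]
          rw [hdrop] at h
          cases h with
          | cons₂ _ h' => exact h'
          | cons _ h' => exact (List.sublist_cons_self i rest).trans h'
    · -- no match at index k: both continue from k+1 with the same state
      have hstepA : funcOuter lis n (i :: rest) k = funcOuter lis n (i :: rest) (k + 1) := by
        conv_rhs => rw [funcOuter]
        rw [funcOuter, PySem.List.pyRange_one_cons hkn, funcInner, hget]
        simp [Ne.symm hv]
      have hstepB : funcAltLoop lis (k :: PySem.List.pyRange (k+1) n 1) kp =
          funcAltLoop lis (PySem.List.pyRange (k+1) n 1) kp := by
        rw [funcAltLoop, hget]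
        simp only [← hi]
        simp [hv]
      rw [hstepA, hstepB]
      apply ih (k+1) n lis kp (i :: rest) (by omega) (by omega) hkp hpat
      rcases hinv with h | h
      · exact Or.inl h
      · right
        rw [hk1]
        rw [hdrop] at h
        cases h with
        | cons₂ _ h' => exact absurd rfl hv
        | cons _ h' => exact h'

-- ===== VERDICT (by name: the statement is the Claim_ definition above) =====
theorem func_spec : Claim_equal_func := by
  intro lis n _ hpre
  unfold Spec_func func func_alt
  apply func_key (n - 0).toNat 0 n lis 0 [0,0,7] rfl (by omega) (by omega) rfl
  simpa using hpre
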